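-- pv_equiv track=rewrite | github.com/PlayfulProcess/recursive.eco-schemas | scripts/build_popol_vuh.py | extract_books
-- ===== SOURCE A (Python) =====
-- def extract_books(text):
--     """Extract the four narrative books from the text."""
--     lines = text.split("\n")
--
--     # Find the start lines of each book
--     book_starts = []
--     for i, line in enumerate(lines):
--         stripped = line.strip()
--         if stripped in ("THE FIRST BOOK", "THE SECOND BOOK", "THE THIRD BOOK", "THE FOURTH BOOK"):
--             book_starts.append((i, stripped))
--
--     # Find the end of the narrative section (COSMOGONY or BOOK II. COMMENTED)
--     narrative_end = len(lines)
--     for i, line in enumerate(lines):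
--         stripped = line.strip()
--         if stripped in ('COSMOGONY OF THE "POPOL VUH"', "BOOK II. COMMENTED UPON"):
--             narrative_end = i
--             break
--
--     books = []
--     for idx, (start_line, title) in enumerate(book_starts):
--         # End is either the next book's start or narrative_end
--         if idx + 1 < len(book_starts):
--             end_line = book_starts[idx + 1][0]
--         else:
--             end_line = narrative_end
--
--         # Skip the title line and any blank lines after it
--         content_start = start_line + 1
--         book_text = "\n".join(lines[content_start:end_line]).strip()
--         books.append((title, book_text))
--
--     return books
-- ===== SOURCE B (Python) =====
-- _BOOK_TITLES = ("THE FIRST BOOK", "THE SECOND BOOK", "THE THIRD BOOK", "THE FOURTH BOOK")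
-- _END_MARKERS = ('COSMOGONY OF THE "POPOL VUH"', "BOOK II. COMMENTED UPON")
--
--
-- def extract_books(text):
--     """Extract the four narrative books from the text (single forward pass)."""
--     lines = text.split("\n")
--     books = []
--     open_book = None      # (start_index, title) of the book currently being read
--     narrative_end = None  # first end-marker line index, once seen
--     for i, line in enumerate(lines):
--         stripped = line.strip()
--         if stripped in _BOOK_TITLES:
--             if open_book is not None:
--                 start, title = open_book
--                 books.append((title, "\n".join(lines[start + 1:i]).strip()))
--             open_book = (i, stripped)
--         elif stripped in _END_MARKERS and narrative_end is None:
--             narrative_end = i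
--     if open_book is not None:
--         start, title = open_book
--         end = narrative_end if narrative_end is not None else len(lines)
--         books.append((title, "\n".join(lines[start + 1:end]).strip()))
--     return books
-- ===== Notes on version B (the rewrite author's own statement) =====
-- stated objective: alternative
-- what changed: Replaces A's three passes over the lines (collect all book-start indices, find the narrative end, then a third loop indexing book_starts[idx+1]) by a single forward pass that keeps the currently open book and finalizes it at the next title line or, for the last book, at the first end marker.
import Mathlib
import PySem

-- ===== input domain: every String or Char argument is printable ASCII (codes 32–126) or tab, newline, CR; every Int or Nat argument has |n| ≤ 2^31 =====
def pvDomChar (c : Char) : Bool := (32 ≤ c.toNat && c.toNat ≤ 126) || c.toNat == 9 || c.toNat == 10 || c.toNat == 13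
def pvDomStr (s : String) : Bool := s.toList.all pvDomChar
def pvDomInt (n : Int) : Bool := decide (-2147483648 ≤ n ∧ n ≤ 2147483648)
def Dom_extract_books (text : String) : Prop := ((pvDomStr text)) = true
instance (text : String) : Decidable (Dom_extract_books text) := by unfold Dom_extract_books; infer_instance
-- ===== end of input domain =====

-- B replaces A's three passes over the lines by one forward pass keeping the open book; same result, similar cost.

-- shared literal tests: membership in the two tuples of marker strings
def pvIsBook (s : String) : Bool :=
  s == "THE FIRST BOOK" || s == "THE SECOND BOOK" || s == "THE THIRD BOOK" || s == "THE FOURTH BOOK"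

def pvIsEnd (s : String) : Bool :=
  s == "COSMOGONY OF THE \"POPOL VUH\"" || s == "BOOK II. COMMENTED UPON"

-- ===== PORT A =====
-- A's second loop: first end-marker index, with break; default = len(lines)
def pvFindEnd : List (Int × String) → Int → Int
  | [], d => d
  | p :: rest, d => if pvIsEnd (PySem.Str.strip p.2) then p.1 else pvFindEnd rest d

def extract_books (text : String) : List (String × String) :=
  let lines := (PySem.Str.split? text "\n").getD []   -- sep = "\n" ≠ "", so split? is some
  let book_starts := (PySem.List.enumerate lines).foldl
    (fun acc p =>
      let stripped := PySem.Str.strip p.2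
      if pvIsBook stripped then acc ++ [(p.1, stripped)] else acc) []
  let narrative_end := pvFindEnd (PySem.List.enumerate lines) (lines.length : Int)
  (PySem.List.enumerate book_starts).foldl
    (fun books q =>
      let idx := q.1
      let start_line := q.2.1
      let title := q.2.2
      let end_line :=
        if idx + 1 < (book_starts.length : Int) then
          (PySem.List.pyGetD book_starts (idx + 1) (0, "")).1   -- guarded in-range lookup book_starts[idx+1][0]
        else narrative_end
      let book_text := PySem.Str.strip
        (PySem.Str.join "\n" (PySem.List.slice lines (some (start_line + 1)) (some end_line)))
      books ++ [(title, book_text)]) []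

-- ===== PORT B =====
-- finalize one book: (title, "\n".join(lines[start+1:end]).strip())
def pvBFinish (lines : List String) (st : Int) (t : String) (e : Int) : String × String :=
  (t, PySem.Str.strip (PySem.Str.join "\n" (PySem.List.slice lines (some (st + 1)) (some e))))

-- B's single forward loop over the enumerated lines
def pvBLoop (lines : List String) :
    List (Int × String) → List (String × String) → Option (Int × String) → Option Int →
    List (String × String)
  | [], acc, open?, ne =>
      (match open? with
       | none => acc
       | some (st, t) => acc ++ [pvBFinish lines st t (ne.getD (lines.length : Int))])
  | (i, line) :: rest, acc, open?, ne =>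
      let s := PySem.Str.strip line
      if pvIsBook s then
        let acc' := match open? with
          | none => acc
          | some (st, t) => acc ++ [pvBFinish lines st t i]
        pvBLoop lines rest acc' (some (i, s)) ne
      else if pvIsEnd s && ne.isNone then
        pvBLoop lines rest acc open? (some i)
      else
        pvBLoop lines rest acc open? ne

def extract_books_alt (text : String) : List (String × String) :=
  let lines := (PySem.Str.split? text "\n").getD []
  pvBLoop lines (PySem.List.enumerate lines) [] none none

-- ===== PRECONDITION & SPEC =====
def Spec_extract_books (text : String) (out : List (String × String)) : Prop := out = extract_books_alt text
instance (text : String) (out : List (String × String)) : Decidable (Spec_extract_books text out) := by unfold Spec_extract_books; infer_instance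

-- ===== CLAIM (what is proved, stated in full; the proofs are below) =====
def Claim_equal_extract_books : Prop := ∀ (text : String), Dom_extract_books text → Spec_extract_books text (extract_books text)

-- ===== LEMMAS AND PROOFS =====

-- the common intermediate description: the (index, title) list of book-start lines …
def pvStarts : List String → Int → List (Int × String)
  | [], _ => []
  | l :: rest, k =>
      let s := PySem.Str.strip l
      if pvIsBook s then (k, s) :: pvStarts rest (k + 1) else pvStarts rest (k + 1)

-- … the first end-marker index …
def pvFirstEnd : List String → Int → Option Int
  | [], _ => none
  | l :: rest, k => if pvIsEnd (PySem.Str.strip l) then some k else pvFirstEnd rest (k + 1)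

-- … and the book list built from consecutive starts, the last one capped by nend
def pvChain (lines : List String) (nend : Int) : Int → String → List (Int × String) → List (String × String)
  | st, t, [] => [pvBFinish lines st t nend]
  | st, t, (q, u) :: rest => pvBFinish lines st t q :: pvChain lines nend q u rest

def pvBuild (lines : List String) (open? : Option (Int × String)) (ms : List (Int × String)) (nend : Int) :
    List (String × String) :=
  match open? with
  | none => match ms with
            | [] => []
            | (p, t) :: rest => pvChain lines nend p t rest
  | some (st, t) => pvChain lines nend st t ms

lemma pvIsBook_not_end {s : String} (h : pvIsBook s = true) : pvIsEnd s = false := by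
  simp only [pvIsBook, Bool.or_eq_true, beq_iff_eq] at h
  rcases h with ((h | h) | h) | h <;> subst h <;> decide

lemma pvStarts_fold (post : List String) : ∀ (k : Int) (acc : List (Int × String)),
    (PySem.List.enumerate post k).foldl
      (fun acc p =>
        let stripped := PySem.Str.strip p.2
        if pvIsBook stripped then acc ++ [(p.1, stripped)] else acc) acc
      = acc ++ pvStarts post k := by
  induction post with
  | nil => intro k acc; simp [pvStarts, PySem.List.enumerate]
  | cons l rest ih =>
      intro k acc
      rw [PySem.List.enumerate_cons]
      simp only [List.foldl_cons, pvStarts]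
      by_cases h : pvIsBook (PySem.Str.strip l) = true
      · simp [h, ih]
      · simp [h, ih]

lemma pvFindEnd_eq (post : List String) : ∀ (k d : Int),
    pvFindEnd (PySem.List.enumerate post k) d = (pvFirstEnd post k).getD d := by
  induction post with
  | nil => intro k d; simp [pvFindEnd, pvFirstEnd, PySem.List.enumerate]
  | cons l rest ih =>
      intro k d
      rw [PySem.List.enumerate_cons]
      simp only [pvFindEnd, pvFirstEnd]
      by_cases h : pvIsEnd (PySem.Str.strip l) = true
      · simp [h]
      · simp [h, ih]

-- A's third loop equals pvChain on the start list
lemma pvAfold (lines : List String) (nend : Int) (S : List (Int × String)) :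
    ∀ (post : List (Int × String)) (k : Nat) (acc : List (String × String)),
    S.drop k = post →
    (PySem.List.enumerate post (k : Int)).foldl
      (fun books q =>
        let idx := q.1
        let start_line := q.2.1
        let title := q.2.2
        let end_line :=
          if idx + 1 < (S.length : Int) then (PySem.List.pyGetD S (idx + 1) (0, "")).1
          else nend
        let book_text := PySem.Str.strip
          (PySem.Str.join "\n" (PySem.List.slice lines (some (start_line + 1)) (some end_line)))
        books ++ [(title, book_text)]) acc
    = acc ++ (match post with
              | [] => []
              | (p, t) :: rest => pvChain lines nend p t rest) := by
  intro post
  induction post with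
  | nil => intro k acc _; simp [PySem.List.enumerate]
  | cons hd rest ih =>
      intro k acc hdrop
      obtain ⟨p, t⟩ := hd
      rw [PySem.List.enumerate_cons]
      simp only [List.foldl_cons]
      have hk : k < S.length := by
        by_contra hge
        simp [List.drop_eq_nil_of_le (Nat.le_of_not_lt hge)] at hdrop
      have hdrop1 : S.drop (k + 1) = rest := by
        have := congrArg List.tail hdrop
        simpa [List.tail_drop] using this
      have hlen : S.length - k = rest.length + 1 := by
        rw [← List.length_drop, hdrop]; simp
      cases rest with
      | nil =>
          have hcond : ¬ ((k : Int) + 1 < (S.length : Int)) := by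
            simp at hlen
            have : S.length = k + 1 := by omega
            rw [this]; push_cast; omega
          simp only [hcond, if_false]
          rw [PySem.List.enumerate]
          simp [pvChain, pvBFinish]
      | cons hd2 rest2 =>
          obtain ⟨q, u⟩ := hd2
          have hcond : (k : Int) + 1 < (S.length : Int) := by
            simp at hlen
            have : k + 1 < S.length := by omega
            omega
          have hget : PySem.List.pyGetD S ((k : Int) + 1) (0, "") = (q, u) := by
            have hcast : (k : Int) + 1 = ((k + 1 : Nat) : Int) := by push_cast; ring
            rw [hcast, PySem.List.pyGetD_natCast]
            have h0 : S[k + 1]? = some (q, u) := by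
              have h1 := @List.getElem?_drop _ S (k + 1) 0
              rw [hdrop1] at h1
              simpa using h1.symm
            simp [List.getD, h0]
          simp only [hcond, if_true, hget]
          have hrec := ih (k + 1) (acc ++ [pvBFinish lines p t q]) hdrop1
          simp only [pvBFinish] at hrec
          push_cast at hrec ⊢
          rw [hrec]
          simp [pvChain, pvBFinish]

-- B's loop computes pvBuild of the remaining suffix
lemma pvBLoop_eq (lines : List String) : ∀ (post : List String) (k : Int)
    (acc : List (String × String)) (open? : Option (Int × String)) (ne : Option Int),
    pvBLoop lines (PySem.List.enumerate post k) acc open? ne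
      = acc ++ pvBuild lines open? (pvStarts post k)
          ((match ne with | some e => some e | none => pvFirstEnd post k).getD (lines.length : Int)) := by
  intro post
  induction post with
  | nil =>
      intro k acc open? ne
      rw [PySem.List.enumerate]
      cases open? with
      | none => cases ne <;> simp [pvBLoop, pvBuild, pvStarts]
      | some o =>
          obtain ⟨st, t⟩ := o
          cases ne <;> simp [pvBLoop, pvBuild, pvStarts, pvFirstEnd, pvChain]
  | cons l rest ih =>
      intro k acc open? ne
      rw [PySem.List.enumerate_cons]
      by_cases hb : pvIsBook (PySem.Str.strip l) = true
      · have hne : pvIsEnd (PySem.Str.strip l) = false := pvIsBook_not_end hb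
        cases open? with
        | none =>
            simpa [pvBLoop, hb, hne, pvStarts, pvFirstEnd, pvBuild]
              using ih (k + 1) acc (some (k, PySem.Str.strip l)) ne
        | some o =>
            obtain ⟨st, t⟩ := o
            simpa [pvBLoop, hb, hne, pvStarts, pvFirstEnd, pvBuild, pvChain, pvBFinish]
              using ih (k + 1) (acc ++ [pvBFinish lines st t k]) (some (k, PySem.Str.strip l)) ne
      · by_cases he : pvIsEnd (PySem.Str.strip l) = true
        · cases ne with
          | none =>
              simpa [pvBLoop, hb, he, pvStarts, pvFirstEnd]
                using ih (k + 1) acc open? (some k)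
          | some e =>
              simpa [pvBLoop, hb, he, pvStarts]
                using ih (k + 1) acc open? (some e)
        · cases ne with
          | none =>
              simpa [pvBLoop, hb, he, pvStarts, pvFirstEnd]
                using ih (k + 1) acc open? none
          | some e =>
              simpa [pvBLoop, hb, he, pvStarts]
                using ih (k + 1) acc open? (some e)

-- ===== VERDICT (by name: the statement is the Claim_ definition above) =====
theorem extract_books_spec : Claim_equal_extract_books := by
  intro text _
  unfold Spec_extract_books extract_books extract_books_alt
  set lines := (PySem.Str.split? text "\n").getD [] with hlines
  simp only []
  have hA := pvAfold lines ((pvFirstEnd lines 0).getD (lines.length : Int)) (pvStarts lines 0)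
    (pvStarts lines 0) 0 [] (by simp)
  simp only [Nat.cast_zero] at hA
  rw [pvStarts_fold lines 0, pvFindEnd_eq lines 0, List.nil_append,
      pvBLoop_eq lines lines 0 [] none none, hA]
  simp only [List.nil_append, Option.getD]
  cases hS : pvStarts lines 0 with
  | nil => simp [pvBuild]
  | cons hd rest => obtain ⟨p, t⟩ := hd; simp [pvBuild]
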